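-- pv_equiv track=rewrite | github.com/QuangNguyenLong/mininumpy | mininumpy/array.py | shaped_to_flat_index
-- ===== SOURCE A (Python) =====
-- def shaped_to_flat_index(vec, shape):
--     """
--     TODO: Add description.
--
--     Args:
--         vec:
--         shape:
--
--     Returns:
--     """
--     ndim = len(shape)
--     ans = 0
--     for i in range(ndim):
--         prod = 1
--         for j in range(i + 1, ndim):
--             prod *= shape[j]
--         ans += prod * vec[i]
--
--     return ans
-- ===== SOURCE B (Python) =====
-- def shaped_to_flat_index(vec, shape):
--     ans = 0
--     stride = 1
--     for i in reversed(range(len(shape))):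
--         ans += stride * vec[i]
--         stride *= shape[i]
--     return ans
-- ===== Notes on version B (the rewrite author's own statement) =====
-- stated objective: faster
-- what changed: Replace the nested loop that recomputes the suffix product of shape for every index with a single backward pass keeping a running stride accumulator.
import Mathlib
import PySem

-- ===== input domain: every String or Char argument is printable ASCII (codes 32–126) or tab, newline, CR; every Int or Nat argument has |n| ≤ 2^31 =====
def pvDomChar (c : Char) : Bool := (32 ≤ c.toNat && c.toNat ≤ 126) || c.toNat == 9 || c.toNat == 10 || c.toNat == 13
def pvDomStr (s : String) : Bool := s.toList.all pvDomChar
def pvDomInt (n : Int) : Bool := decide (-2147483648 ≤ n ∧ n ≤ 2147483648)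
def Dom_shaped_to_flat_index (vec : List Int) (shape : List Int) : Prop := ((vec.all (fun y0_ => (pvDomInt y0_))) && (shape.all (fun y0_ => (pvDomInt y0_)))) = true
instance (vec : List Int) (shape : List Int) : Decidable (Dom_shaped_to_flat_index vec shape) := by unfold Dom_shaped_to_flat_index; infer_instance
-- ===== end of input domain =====

-- B computes the same flat index in one backward pass with a running stride accumulator
-- instead of A's nested loop that recomputes each suffix product of shape from scratch.

-- ===== PORT A =====
def shaped_to_flat_index (vec : List Int) (shape : List Int) : Int :=
  let ndim : Int := shape.length
  (PySem.List.pyRange 0 ndim 1).foldl (fun ans i =>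
    ans + ((PySem.List.pyRange (i + 1) ndim 1).foldl
             (fun prod j => prod * PySem.List.pyGetD shape j 0) 1)
          * PySem.List.pyGetD vec i 0) 0

-- ===== PORT B =====
def shaped_to_flat_index_alt (vec : List Int) (shape : List Int) : Int :=
  ((PySem.List.pyRange 0 (shape.length : Int) 1).reverse.foldl
    (fun st i => (st.1 + st.2 * PySem.List.pyGetD vec i 0,
                  st.2 * PySem.List.pyGetD shape i 0)) ((0 : Int), (1 : Int))).1

-- ===== PRECONDITION & SPEC =====
-- Pre_ excludes exactly the inputs where len(vec) < len(shape): there both A and B raise IndexError.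
def Pre_shaped_to_flat_index (vec : List Int) (shape : List Int) : Prop :=
  shape.length ≤ vec.length
instance (vec : List Int) (shape : List Int) : Decidable (Pre_shaped_to_flat_index vec shape) := by
  unfold Pre_shaped_to_flat_index; infer_instance
def pvWitness_shaped_to_flat_index : List Int × List Int := ([1, 2, 3], [4, 5, 6])
def Spec_shaped_to_flat_index (vec : List Int) (shape : List Int) (out : Int) : Prop := out = shaped_to_flat_index_alt vec shape
instance (vec : List Int) (shape : List Int) (out : Int) : Decidable (Spec_shaped_to_flat_index vec shape out) := by unfold Spec_shaped_to_flat_index; infer_instance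

-- ===== CLAIM (what is proved, stated in full; the proofs are below) =====
def Claim_equal_shaped_to_flat_index : Prop := ∀ (vec : List Int) (shape : List Int), Dom_shaped_to_flat_index vec shape → Pre_shaped_to_flat_index vec shape → Spec_shaped_to_flat_index vec shape (shaped_to_flat_index vec shape)

-- ===== LEMMAS AND PROOFS =====

-- fold-as-sum / fold-as-product helpers
theorem pv_foldl_add_map (l : List Int) (f : Int → Int) (a : Int) :
    l.foldl (fun acc i => acc + f i) a = a + (l.map f).sum := by
  induction l generalizing a with
  | nil => simp
  | cons x xs ih => simp [ih]; ring

theorem pv_foldl_mul_map (l : List Int) (g : Int → Int) (a : Int) :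
    l.foldl (fun acc i => acc * g i) a = a * (l.map g).prod := by
  induction l generalizing a with
  | nil => simp
  | cons x xs ih => simp [ih]; ring

-- the common value, as a sum of stride-weighted coordinates (A's form)
def pvS (f g : Int → Int) (n : Nat) : Int :=
  ((PySem.List.pyRange 0 (n : Int) 1).map
    (fun i => ((PySem.List.pyRange (i + 1) (n : Int) 1).map g).prod * f i)).sum

theorem pvS_succ (f g : Int → Int) (n : Nat) :
    pvS f g (n + 1) = g n * pvS f g n + f n := by
  unfold pvS
  have h0 : (0 : Int) ≤ (n : Int) := Int.natCast_nonneg n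
  have hsplit : PySem.List.pyRange 0 ((n : Nat) + 1 : Int) 1
      = PySem.List.pyRange 0 (n : Int) 1 ++ [(n : Int)] := by
    have := PySem.List.pyRange_one_succ_right (a := 0) (b := (n : Int)) h0
    simpa using this
  push_cast
  rw [hsplit]
  simp only [List.map_append, List.sum_append, List.map_cons, List.map_nil, List.sum_cons,
    List.sum_nil]
  have hself : PySem.List.pyRange ((n : Int) + 1) ((n : Int) + 1) 1 = [] :=
    PySem.List.pyRange_one_eq_nil (le_refl _)
  rw [hself]
  have hterm : ∀ i ∈ PySem.List.pyRange 0 (n : Int) 1,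
      ((PySem.List.pyRange (i + 1) ((n : Int) + 1) 1).map g).prod * f i
        = g n * (((PySem.List.pyRange (i + 1) (n : Int) 1).map g).prod * f i) := by
    intro i hi
    have hi' := (PySem.List.mem_pyRange_one.mp hi)
    have : PySem.List.pyRange (i + 1) ((n : Int) + 1) 1
        = PySem.List.pyRange (i + 1) (n : Int) 1 ++ [(n : Int)] :=
      PySem.List.pyRange_one_succ_right (by omega)
    rw [this]; simp; ring
  rw [List.map_congr_left hterm]
  simp [List.sum_map_mul_left]

-- B's backward fold, fully generalized over the accumulator
theorem pv_bfold (f g : Int → Int) (n : Nat) (a s : Int) :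
    ((PySem.List.pyRange 0 (n : Int) 1).reverse.foldl
      (fun st i => (st.1 + st.2 * f i, st.2 * g i)) (a, s))
    = (a + s * pvS f g n, s * ((PySem.List.pyRange 0 (n : Int) 1).map g).prod) := by
  induction n generalizing a s with
  | zero => simp [pvS, PySem.List.pyRange_one_eq_nil (le_refl (0 : Int))]
  | succ m ih =>
    have h0 : (0 : Int) ≤ (m : Int) := Int.natCast_nonneg m
    have hsplit : PySem.List.pyRange 0 ((m : Nat) + 1 : Int) 1
        = PySem.List.pyRange 0 (m : Int) 1 ++ [(m : Int)] := by
      have := PySem.List.pyRange_one_succ_right (a := 0) (b := (m : Int)) h0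
      simpa using this
    push_cast
    rw [hsplit, List.reverse_append]
    simp only [List.reverse_cons, List.reverse_nil, List.nil_append, List.singleton_append,
      List.foldl_cons]
    rw [ih]
    rw [pvS_succ]
    simp only [List.map_append, List.prod_append, List.map_cons, List.map_nil,
      List.prod_cons, List.prod_nil]
    exact Prod.ext (by ring) (by ring)

-- A's nested fold rewritten to the sum pvS
theorem pvA_eq (vec shape : List Int) :
    shaped_to_flat_index vec shape
      = pvS (fun i => PySem.List.pyGetD vec i 0) (fun j => PySem.List.pyGetD shape j 0)
          shape.length := by
  unfold shaped_to_flat_index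
  have hstep : (fun (ans : Int) (i : Int) =>
      ans + ((PySem.List.pyRange (i + 1) (shape.length : Int) 1).foldl
               (fun prod j => prod * PySem.List.pyGetD shape j 0) 1)
            * PySem.List.pyGetD vec i 0)
      = (fun ans i =>
      ans + ((PySem.List.pyRange (i + 1) (shape.length : Int) 1).map
               (fun j => PySem.List.pyGetD shape j 0)).prod
            * PySem.List.pyGetD vec i 0) := by
    funext ans i
    rw [pv_foldl_mul_map]; ring_nf
  simp only [hstep]
  rw [pv_foldl_add_map]
  simp [pvS]

-- ===== VERDICT (by name: the statement is the Claim_ definition above) =====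
theorem shaped_to_flat_index_spec : Claim_equal_shaped_to_flat_index := by
  intro vec shape _ _
  unfold Spec_shaped_to_flat_index shaped_to_flat_index_alt
  rw [pv_bfold, pvA_eq]
  ring
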